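-- pv_equiv track=rewrite | github.com/MatheusHeenrique/PyCutMP3 | tools/cut.py | cut_calculation
-- ===== SOURCE A (Python) =====
-- def cut_calculation(list_of_minutes):
--     new_minutes_list = list()
--
--     for i in list_of_minutes:
--         if len(i) == 2:
--             conta = ((i[0] * 60) + i[1]) * 1000
--             new_minutes_list.append(conta)
--         elif len(i) == 3:
--             conta = (((((i[0] * 60) + i[1]) * 60) + i[2]) * 1000)
--             new_minutes_list.append(conta)
--
--     new_minutes_list.sort()
--     return new_minutes_list
-- ===== SOURCE B (Python) =====
-- def _ms(i):
--     # right-to-left positional accumulation: multiplier 1000, then *60 per place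
--     total = 0
--     mult = 1000
--     for v in reversed(i):
--         total += v * mult
--         mult *= 60
--     return total
--
-- def _insert(xs, v):
--     # insert v into ascending xs, keeping it ascending
--     if not xs or v < xs[0]:
--         return [v] + xs
--     return [xs[0]] + _insert(xs[1:], v)
--
-- def cut_calculation(list_of_minutes):
--     out = []
--     for i in list_of_minutes:
--         if len(i) == 2 or len(i) == 3:
--             out = _insert(out, _ms(i))
--     return out
-- ===== Notes on version B (the rewrite author's own statement) =====
-- stated objective: alternative
-- what changed: B keeps the output sorted at all times by ordered insertion during a single pass (no final sort) and converts each tuple by a right-to-left multiplier accumulation (1000, 60000, 3600000) instead of A's two length-specific Horner branches.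
import Mathlib
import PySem

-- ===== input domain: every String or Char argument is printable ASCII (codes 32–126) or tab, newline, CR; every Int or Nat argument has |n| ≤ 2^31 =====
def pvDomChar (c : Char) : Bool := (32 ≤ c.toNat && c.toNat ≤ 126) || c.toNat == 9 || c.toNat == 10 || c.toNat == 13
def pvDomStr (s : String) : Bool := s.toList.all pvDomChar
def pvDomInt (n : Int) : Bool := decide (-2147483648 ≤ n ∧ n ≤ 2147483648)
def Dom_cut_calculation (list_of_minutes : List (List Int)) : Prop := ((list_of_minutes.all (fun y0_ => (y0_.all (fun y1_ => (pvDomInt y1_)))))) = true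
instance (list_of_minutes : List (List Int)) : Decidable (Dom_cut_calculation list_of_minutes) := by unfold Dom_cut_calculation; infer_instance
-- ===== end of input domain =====

-- B keeps the output sorted at all times by ordered insertion during a single pass (no final
-- sort) and converts each tuple by a right-to-left multiplier accumulation instead of A's two
-- length-specific Horner branches (objective: alternative).

-- ===== PORT A =====
-- literal transliteration: loop appending per-branch values, then sort in place
def cut_calculation (list_of_minutes : List (List Int)) : List Int :=
  let new_minutes_list :=
    list_of_minutes.foldl (fun acc i =>
      if i.length = 2 then
        acc ++ [((PySem.List.pyGetD i 0 0 * 60) + PySem.List.pyGetD i 1 0) * 1000]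
      else if i.length = 3 then
        acc ++ [((((PySem.List.pyGetD i 0 0 * 60) + PySem.List.pyGetD i 1 0) * 60) + PySem.List.pyGetD i 2 0) * 1000]
      else acc) []
  PySem.List.sorted new_minutes_list (fun x => x) false

-- ===== PORT B =====
-- _ms: fold over reversed(i) carrying (total, mult)
def pvMs (i : List Int) : Int :=
  (i.reverse.foldl (fun (st : Int × Int) v => (st.1 + v * st.2, st.2 * 60)) (0, 1000)).1

-- _insert: recursive insertion into an ascending list
def pvInsert (xs : List Int) (v : Int) : List Int :=
  match xs with
  | [] => [v]
  | x :: rest => if v < x then v :: x :: rest else x :: pvInsert rest v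

def cut_calculation_alt (list_of_minutes : List (List Int)) : List Int :=
  list_of_minutes.foldl (fun out i =>
    if i.length = 2 ∨ i.length = 3 then pvInsert out (pvMs i) else out) []

-- ===== PRECONDITION & SPEC =====
def Spec_cut_calculation (list_of_minutes : List (List Int)) (out : List Int) : Prop := out = cut_calculation_alt list_of_minutes
instance (list_of_minutes : List (List Int)) (out : List Int) : Decidable (Spec_cut_calculation list_of_minutes out) := by unfold Spec_cut_calculation; infer_instance

-- ===== CLAIM =====
def Claim_equal_cut_calculation : Prop := ∀ (list_of_minutes : List (List Int)), Dom_cut_calculation list_of_minutes → Spec_cut_calculation list_of_minutes (cut_calculation list_of_minutes)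

-- ===== LEMMAS AND PROOFS =====

-- the value A appends for a kept row
def pvA (i : List Int) : Int :=
  if i.length = 2 then ((PySem.List.pyGetD i 0 0 * 60) + PySem.List.pyGetD i 1 0) * 1000
  else ((((PySem.List.pyGetD i 0 0 * 60) + PySem.List.pyGetD i 1 0) * 60) + PySem.List.pyGetD i 2 0) * 1000

-- on kept rows, B's right-to-left accumulation equals A's branch formula
theorem pv_ms_eq (i : List Int) (h : i.length = 2 ∨ i.length = 3) : pvMs i = pvA i := by
  match i, h with
  | [a, b], _ => simp [pvMs, pvA, PySem.List.pyGetD]; ring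
  | [a, b, c], _ => simp [pvMs, pvA, PySem.List.pyGetD]; ring

-- A's unsorted accumulation is the filtered map, generalized over the accumulator
theorem pv_acc_eq (l : List (List Int)) (acc : List Int) :
    l.foldl (fun acc i =>
      if i.length = 2 then
        acc ++ [((PySem.List.pyGetD i 0 0 * 60) + PySem.List.pyGetD i 1 0) * 1000]
      else if i.length = 3 then
        acc ++ [((((PySem.List.pyGetD i 0 0 * 60) + PySem.List.pyGetD i 1 0) * 60) + PySem.List.pyGetD i 2 0) * 1000]
      else acc) acc
    = acc ++ (l.filter (fun i => decide (i.length = 2 ∨ i.length = 3))).map pvA := by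
  induction l generalizing acc with
  | nil => simp
  | cons i t ih =>
    rw [List.foldl_cons]
    by_cases h2 : i.length = 2
    · simp only [if_pos h2, List.filter_cons, ih]
      simp [pvA, h2]
    · by_cases h3 : i.length = 3
      · simp only [if_neg h2, if_pos h3, List.filter_cons, ih]
        simp [pvA, h3]
      · simp only [if_neg h2, if_neg h3, List.filter_cons, ih]
        simp [h2, h3]

theorem pv_insert_perm (xs : List Int) (v : Int) : (pvInsert xs v).Perm (v :: xs) := by
  induction xs with
  | nil => simp [pvInsert]
  | cons x rest ih =>
    unfold pvInsert
    by_cases h : v < x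
    · simp [h]
    · simp only [if_neg h]
      exact (ih.cons x).trans (List.Perm.swap v x rest)

theorem pv_insert_mem (xs : List Int) (v y : Int) (hy : y ∈ pvInsert xs v) : y = v ∨ y ∈ xs := by
  have := (pv_insert_perm xs v).mem_iff.mp hy
  simpa using this

theorem pv_insert_sorted (xs : List Int) (v : Int) (h : xs.Pairwise (· ≤ ·)) :
    (pvInsert xs v).Pairwise (· ≤ ·) := by
  induction xs with
  | nil => simp [pvInsert]
  | cons x rest ih =>
    rcases List.pairwise_cons.mp h with ⟨hx, hrest⟩
    unfold pvInsert
    by_cases hv : v < x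
    · simp only [if_pos hv]
      refine List.pairwise_cons.mpr ⟨?_, h⟩
      intro y hy
      rcases List.mem_cons.mp hy with rfl | hy
      · exact le_of_lt hv
      · exact le_trans (le_of_lt hv) (hx y hy)
    · simp only [if_neg hv]
      refine List.pairwise_cons.mpr ⟨?_, ih hrest⟩
      intro y hy
      rcases pv_insert_mem rest v y hy with rfl | hy
      · exact le_of_not_gt hv
      · exact hx y hy
def pvStep : List Int → List Int → List Int := fun out i =>
  if i.length = 2 ∨ i.length = 3 then pvInsert out (pvMs i) else out

-- invariant for B's single pass: sortedness and permutation with the filtered map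
theorem pv_fold_invariant (l : List (List Int)) (acc : List Int)
    (hs : acc.Pairwise (· ≤ ·)) :
    (l.foldl pvStep acc).Pairwise (· ≤ ·) ∧
    (l.foldl pvStep acc).Perm
      (acc ++ (l.filter (fun i => decide (i.length = 2 ∨ i.length = 3))).map pvMs) := by
  induction l generalizing acc with
  | nil => simpa using hs
  | cons i t ih =>
    rw [List.foldl_cons]
    by_cases h : i.length = 2 ∨ i.length = 3
    · have step : pvStep acc i = pvInsert acc (pvMs i) := by simp [pvStep, h]
      rw [step]
      obtain ⟨hp, hperm⟩ := ih (pvInsert acc (pvMs i)) (pv_insert_sorted acc (pvMs i) hs)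
      refine ⟨hp, hperm.trans ?_⟩
      have hf : (i :: t).filter (fun i => decide (i.length = 2 ∨ i.length = 3))
          = i :: t.filter (fun i => decide (i.length = 2 ∨ i.length = 3)) := by simp [h]
      rw [hf, List.map_cons]
      refine ((pv_insert_perm acc (pvMs i)).append_right _).trans ?_
      rw [List.cons_append]
      exact List.perm_middle.symm
    · have step : pvStep acc i = acc := by simp [pvStep, h]
      rw [step]
      obtain ⟨hp, hperm⟩ := ih acc hs
      refine ⟨hp, hperm.trans ?_⟩
      have hf : (i :: t).filter (fun i => decide (i.length = 2 ∨ i.length = 3))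
          = t.filter (fun i => decide (i.length = 2 ∨ i.length = 3)) := by simp [h]
      rw [hf]

-- the two filtered maps coincide
theorem pv_map_eq (l : List (List Int)) :
    (l.filter (fun i => decide (i.length = 2 ∨ i.length = 3))).map pvMs
      = (l.filter (fun i => decide (i.length = 2 ∨ i.length = 3))).map pvA := by
  apply List.map_congr_left
  intro i hi
  exact pv_ms_eq i (by simpa using (List.mem_filter.mp hi).2)

-- ===== VERDICT =====
theorem cut_calculation_spec : Claim_equal_cut_calculation := by
  intro l _
  unfold Spec_cut_calculation cut_calculation
  rw [pv_acc_eq, List.nil_append]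
  obtain ⟨hp, hperm⟩ := pv_fold_invariant l [] (by simp)
  rw [List.nil_append] at hperm
  have := PySem.List.sorted_id_eq_of_perm_of_pairwise
    (xs := (l.filter (fun i => decide (i.length = 2 ∨ i.length = 3))).map pvA)
    (ys := cut_calculation_alt l) (by rwa [← pv_map_eq]) hp
  simpa using this
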